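-- pv_equiv track=rewrite | github.com/ChrisGVE/workspace-qdrant-mcp | src/workspace_qdrant_mcp/core/auto_ingestion.py | _select_primary_collection
-- ===== SOURCE A (Python) =====
-- from typing import Any, Dict, List, Optional, Set
--
-- def _select_primary_collection(project_info: Dict[str, Any], collections: List[str]) -> str:
--     """Select the primary collection for the project."""
--     main_project = project_info["main_project"]
--
--     # Prefer exact match
--     if main_project in collections:
--         return main_project
--
--     # Look for collections that start with the project name
--     matching = [c for c in collections if c.startswith(f"{main_project}.")]
--     if matching:
--         return matching[0]
--
--     # Fall back to first available collection
--     return collections[0] if collections else "documents"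
-- ===== SOURCE B (Python) =====
-- def _select_primary_collection(project_info, collections):
--     main_project = project_info["main_project"]
--     if not collections:
--         return "documents"
--     prefix = main_project + "."
--
--     def rank(c):
--         return 0 if c == main_project else (1 if c.startswith(prefix) else 2)
--
--     return min(collections, key=rank)
-- ===== Notes on version B (the rewrite author's own statement) =====
-- stated objective: alternative
-- what changed: B replaces A's staged scans (membership test, then a prefix filter, then a positional fallback) with a ranking scheme: every collection gets a priority key (0 exact, 1 prefix, 2 other) and the answer is the stable min of the list under that key.
import Mathlib
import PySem

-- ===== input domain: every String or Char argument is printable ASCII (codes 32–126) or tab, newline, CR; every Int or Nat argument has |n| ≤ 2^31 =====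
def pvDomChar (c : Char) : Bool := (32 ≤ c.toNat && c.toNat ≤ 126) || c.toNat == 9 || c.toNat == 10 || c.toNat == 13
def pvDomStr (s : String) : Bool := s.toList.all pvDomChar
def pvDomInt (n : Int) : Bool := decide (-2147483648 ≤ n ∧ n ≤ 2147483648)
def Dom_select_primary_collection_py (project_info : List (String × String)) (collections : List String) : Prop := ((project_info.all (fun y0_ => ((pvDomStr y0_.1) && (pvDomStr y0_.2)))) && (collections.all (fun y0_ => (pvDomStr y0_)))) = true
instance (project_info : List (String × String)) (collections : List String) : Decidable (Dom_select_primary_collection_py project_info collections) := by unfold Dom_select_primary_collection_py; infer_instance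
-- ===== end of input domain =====

-- B replaces A's staged scans (membership test, prefix filter, positional fallback) by a ranking
-- scheme: each collection gets a priority key (0 exact, 1 prefix, 2 other) and B returns the
-- stable min by that key; same cost class, a different algorithm.

-- ===== PORT A =====
def select_primary_collection_py (project_info : List (String × String)) (collections : List String) : String :=
  let main_project := PySem.Dict.getD (PySem.Dict.mk project_info) "main_project" ""   -- under Pre_, the key is present
  if collections.contains main_project then main_project
  else
    let matching := collections.filter (fun c => PySem.Str.startswith c (main_project ++ "."))
    match matching with
    | m :: _ => m
    | [] => match collections with
            | c :: _ => c
            | [] => "documents"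

-- ===== PORT B =====
-- the nested rank(c) helper of Source B
def pvRank (main_project prefix_ c : String) : Int :=
  if c == main_project then 0 else if PySem.Str.startswith c prefix_ then 1 else 2

def select_primary_collection_py_alt (project_info : List (String × String)) (collections : List String) : String :=
  let main_project := PySem.Dict.getD (PySem.Dict.mk project_info) "main_project" ""
  match collections with
  | [] => "documents"
  | _ :: _ =>
    -- min(collections, key=rank): the first element with minimal rank
    match PySem.List.min? collections (pvRank main_project (main_project ++ ".")) with
    | some m => m
    | none => "documents"

-- ===== PRECONDITION & SPEC =====
-- A raises KeyError when project_info has no "main_project" key; Pre_ excludes exactly those inputs.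
def Pre_select_primary_collection_py (project_info : List (String × String)) (collections : List String) : Prop :=
  "main_project" ∈ project_info.map Prod.fst
instance (project_info : List (String × String)) (collections : List String) : Decidable (Pre_select_primary_collection_py project_info collections) := by unfold Pre_select_primary_collection_py; infer_instance
def pvWitness_select_primary_collection_py : (List (String × String)) × List String :=
  ([("main_project", "proj")], ["other", "proj.docs"])

def Spec_select_primary_collection_py (project_info : List (String × String)) (collections : List String) (out : String) : Prop := out = select_primary_collection_py_alt project_info collections
instance (project_info : List (String × String)) (collections : List String) (out : String) : Decidable (Spec_select_primary_collection_py project_info collections out) := by unfold Spec_select_primary_collection_py; infer_instance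

-- ===== CLAIM (what is proved, stated in full; the proofs are below) =====
def Claim_equal_select_primary_collection_py : Prop := ∀ (project_info : List (String × String)) (collections : List String), Dom_select_primary_collection_py project_info collections → Pre_select_primary_collection_py project_info collections → Spec_select_primary_collection_py project_info collections (select_primary_collection_py project_info collections)

-- ===== LEMMAS AND PROOFS =====

-- the fold step of PySem.List.min? specialised to the rank key
def pvStep (mp pre : String) (acc : Option String) (x : String) : Option String :=
  match acc with
  | none => some x
  | some m => if pvRank mp pre x < pvRank mp pre m then some x else some m

theorem min?_eq_foldl (mp pre : String) (cs : List String) :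
    PySem.List.min? cs (pvRank mp pre) = cs.foldl (pvStep mp pre) none := by
  unfold PySem.List.min?
  congr 1
  funext acc x
  cases acc <;> rfl

theorem pvRank_nonneg (mp pre c : String) : 0 ≤ pvRank mp pre c := by
  unfold pvRank; split_ifs <;> norm_num

-- a rank-0 state (the exact match) is never replaced
theorem loop_exact (mp pre : String) (cs : List String) :
    cs.foldl (pvStep mp pre) (some mp) = some mp := by
  induction cs with
  | nil => rfl
  | cons x rest ih =>
    have h : ¬ pvRank mp pre x < pvRank mp pre mp := by
      have := pvRank_nonneg mp pre x
      simp [pvRank]; omega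
    simpa [pvStep, h] using ih

-- a rank-1 state (a prefix match) is only ever replaced by the exact match
theorem loop_prefix (mp pre m : String) (hm : pvRank mp pre m = 1) (cs : List String) :
    cs.foldl (pvStep mp pre) (some m) =
      if cs.contains mp then some mp else some m := by
  induction cs with
  | nil => simp
  | cons x rest ih =>
    by_cases hc : x = mp
    · have h : pvRank mp pre x < pvRank mp pre m := by rw [hc, hm]; simp [pvRank]
      have hct : (x :: rest).contains mp = true := by simp [hc]
      rw [List.foldl_cons, hct]
      simp only [pvStep, if_pos h]
      rw [hc]; exact loop_exact mp pre rest
    · have h : ¬ pvRank mp pre x < pvRank mp pre m := by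
        rw [hm]; unfold pvRank
        have : (x == mp) = false := beq_false_of_ne hc
        simp [this]; split_ifs <;> omega
      have hc' : ¬ mp = x := fun h => hc h.symm
      simp [List.foldl_cons, pvStep, h, ih, hc']

-- a rank-2 state is replaced by the exact match, else by the first prefix match
theorem loop_other (mp pre m : String) (hm : pvRank mp pre m = 2) (cs : List String) :
    cs.foldl (pvStep mp pre) (some m) =
      if cs.contains mp then some mp
      else match cs.filter (fun c => PySem.Str.startswith c pre) with
           | [] => some m
           | h :: _ => some h := by
  induction cs generalizing m with
  | nil => simp
  | cons x rest ih =>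
    by_cases hc : x = mp
    · have h : pvRank mp pre x < pvRank mp pre m := by rw [hc, hm]; simp [pvRank]
      have hct : (x :: rest).contains mp = true := by simp [hc]
      rw [List.foldl_cons, hct]
      simp only [pvStep, if_pos h]
      rw [hc]; exact loop_exact mp pre rest
    · have hb : (x == mp) = false := beq_false_of_ne hc
      have hc' : ¬ mp = x := fun h => hc h.symm
      by_cases hp : PySem.Chars.startswith x.toList pre.toList = true
      · have hr : pvRank mp pre x = 1 := by simp [pvRank, hb, PySem.Str.startswith, hp]
        have h : pvRank mp pre x < pvRank mp pre m := by omega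
        rw [List.foldl_cons]
        simp only [pvStep, if_pos h]
        rw [loop_prefix mp pre x hr]
        by_cases hmem : rest.contains mp = true <;>
          simp [hmem, hc', List.filter_cons, PySem.Str.startswith, hp]
      · have hpf : PySem.Chars.startswith x.toList pre.toList = false := by
          simpa using hp
        have hr : pvRank mp pre x = 2 := by simp [pvRank, hb, PySem.Str.startswith, hpf]
        have h : ¬ pvRank mp pre x < pvRank mp pre m := by omega
        rw [List.foldl_cons]
        simp only [pvStep, if_neg h]
        rw [ih m hm]
        by_cases hmem : rest.contains mp = true <;>
          simp [hmem, hc', List.filter_cons, PySem.Str.startswith, hpf]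

-- ===== VERDICT (by name: the statement is the Claim_ definition above) =====
theorem select_primary_collection_py_spec : Claim_equal_select_primary_collection_py := by
  intro project_info collections _ _
  unfold Spec_select_primary_collection_py select_primary_collection_py select_primary_collection_py_alt
  dsimp only
  set mp := PySem.Dict.getD (PySem.Dict.mk project_info) "main_project" "" with hmp
  cases collections with
  | nil => simp
  | cons x rest =>
    rw [min?_eq_foldl, List.foldl_cons]
    simp only [pvStep]
    by_cases hc : x = mp
    · have hct : (x :: rest).contains mp = true := by simp [hc]
      rw [hc, loop_exact mp (mp ++ ".") rest]
      simp [hct]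
    · have hb : (x == mp) = false := beq_false_of_ne hc
      have hc' : ¬ mp = x := fun h => hc h.symm
      by_cases hp : PySem.Chars.startswith x.toList (mp.toList ++ ['.']) = true
      · have hr : pvRank mp (mp ++ ".") x = 1 := by
          simp [pvRank, hb, PySem.Str.startswith, hp]
        rw [loop_prefix mp (mp ++ ".") x hr]
        by_cases hmem : mp ∈ rest <;>
          simp [hmem, hc', List.filter_cons, PySem.Str.startswith, hp]
      · have hpf : PySem.Chars.startswith x.toList (mp.toList ++ ['.']) = false := by
          simpa using hp
        have hr : pvRank mp (mp ++ ".") x = 2 := by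
          simp [pvRank, hb, PySem.Str.startswith, hpf]
        rw [loop_other mp (mp ++ ".") x hr]
        by_cases hmem : mp ∈ rest
        · simp [hmem, hc']
        · cases hf : rest.filter (fun c => PySem.Chars.startswith c.toList (mp.toList ++ ['.'])) with
          | nil =>
            simp [hmem, hc', List.filter_cons, PySem.Str.startswith, hpf, hf]
          | cons h t =>
            simp [hmem, hc', List.filter_cons, PySem.Str.startswith, hpf, hf]
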